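-- pv_equiv track=rewrite | github.com/lachlanmcintosh/PRISMM | prismm/run_build_trees_and_timings/get_BP_likelihoods.py | get_path_code
-- ===== SOURCE A (Python) =====
-- def get_path_code(code_list):
--     output = ""
--     count = 0
--
--     for code in code_list:
--         if code == "A":
--             count += 1
--         elif code == "GD":
--             output += str(count)
--             count = 0
--             output += "G"
--
--     output += str(count)
--     return output
-- ===== SOURCE B (Python) =====
-- def get_path_code(code_list):
--     # Two-phase: partition into segments at "GD" markers, then count "A"s per segment.
--     segments = []
--     current = []
--     for code in code_list:
--         if code == "GD":
--             segments.append(current)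
--             current = []
--         else:
--             current.append(code)
--     segments.append(current)
--     return "G".join(str(seg.count("A")) for seg in segments)
-- ===== Notes on version B (the rewrite author's own statement) =====
-- stated objective: alternative
-- what changed: B first partitions the code list into segments delimited by 'GD' markers and then renders the result by joining per-segment 'A' counts with 'G', instead of A's single interleaved loop mutating an output string and a running counter.
import Mathlib
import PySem

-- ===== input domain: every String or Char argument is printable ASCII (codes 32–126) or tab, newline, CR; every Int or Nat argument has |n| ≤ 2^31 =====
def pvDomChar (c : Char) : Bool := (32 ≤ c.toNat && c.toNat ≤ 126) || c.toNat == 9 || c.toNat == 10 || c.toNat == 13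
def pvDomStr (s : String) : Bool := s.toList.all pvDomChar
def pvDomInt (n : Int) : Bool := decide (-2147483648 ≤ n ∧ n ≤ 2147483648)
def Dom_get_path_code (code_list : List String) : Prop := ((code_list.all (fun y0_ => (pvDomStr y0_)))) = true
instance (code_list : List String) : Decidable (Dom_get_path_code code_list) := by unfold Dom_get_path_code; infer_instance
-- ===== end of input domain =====

-- B re-decomposes A's single interleaved loop into two phases — partition at "GD" markers, then join per-segment "A" counts with "G" — same cost, different structure (objective: alternative).


-- ===== PORT A =====
-- one loop body: 'if code == "A": count += 1 elif code == "GD": output += str(count); count = 0; output += "G"'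
def get_path_code_step (st : String × Int) (code : String) : String × Int :=
  if code == "A" then (st.1, st.2 + 1)
  else if code == "GD" then (st.1 ++ PySem.Int.toStr st.2 ++ "G", 0)
  else st

def get_path_code (code_list : List String) : String :=
  let st := code_list.foldl get_path_code_step ("", 0)
  st.1 ++ PySem.Int.toStr st.2

-- ===== PORT B =====
-- phase 1 loop body: close the current segment on "GD", otherwise append the code to it
def get_path_code_alt_step (st : List (List String) × List String) (code : String) :
    List (List String) × List String :=
  if code == "GD" then (st.1 ++ [st.2], [])
  else (st.1, st.2 ++ [code])

def get_path_code_alt (code_list : List String) : String :=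
  let st := code_list.foldl get_path_code_alt_step ([], [])
  let segments := st.1 ++ [st.2]
  PySem.Str.join "G" (segments.map (fun seg => PySem.Int.toStr ((PySem.List.count seg "A" : Nat) : Int)))

-- ===== PRECONDITION & SPEC =====
def Spec_get_path_code (code_list : List String) (out : String) : Prop := out = get_path_code_alt code_list
instance (code_list : List String) (out : String) : Decidable (Spec_get_path_code code_list out) := by unfold Spec_get_path_code; infer_instance

-- ===== CLAIM (what is proved, stated in full; the proofs are below) =====
def Claim_equal_get_path_code : Prop := ∀ (code_list : List String), Dom_get_path_code code_list → Spec_get_path_code code_list (get_path_code code_list)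

-- ===== LEMMAS AND PROOFS =====
-- what one segment contributes: the digits of its "A" count
def pvFmtC (seg : List String) : List Char := PySem.Int.toChars ((seg.count "A" : Nat) : Int)
-- A's accumulated output after a run of closed segments
def pvOut (segs : List (List String)) : List Char := (segs.map (fun s => pvFmtC s ++ ['G'])).flatten

lemma pvJoinG (l : List (List Char)) (x : List Char) :
    (l.map (fun s => s ++ ['G'])).flatten ++ x = PySem.Chars.join ['G'] (l ++ [x]) := by
  induction l with
  | nil => simp [PySem.Chars.join_singleton]
  | cons a t ih =>
    cases t with
    | nil => simp [PySem.Chars.join_cons_cons, PySem.Chars.join_singleton]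
    | cons b r =>
      simp only [List.map_cons, List.flatten_cons, List.cons_append,
        PySem.Chars.join_cons_cons] at *
      rw [← ih]; simp

lemma pvLoopInv (cs : List String) (segs : List (List String)) (cur : List String)
    (out : String) (hout : out.toList = pvOut segs) :
    ((cs.foldl get_path_code_step (out, ((cur.count "A" : Nat) : Int))).1 ++
      PySem.Int.toStr (cs.foldl get_path_code_step (out, ((cur.count "A" : Nat) : Int))).2).toList
    = pvOut (cs.foldl get_path_code_alt_step (segs, cur)).1 ++
        pvFmtC (cs.foldl get_path_code_alt_step (segs, cur)).2 := by
  induction cs generalizing segs cur out with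
  | nil => simp [pvFmtC, hout, PySem.Int.toList_toStr]
  | cons c cs ih =>
    by_cases hA : c = "A"
    · subst hA
      simp only [List.foldl_cons, get_path_code_step, get_path_code_alt_step,
        beq_self_eq_true, reduceIte]
      have hcnt : ((cur.count "A" : Nat) : Int) + 1 = (((cur ++ ["A"]).count "A" : Nat) : Int) := by
        simp [List.count_append]
      rw [hcnt]
      exact ih segs (cur ++ ["A"]) out hout
    · by_cases hG : c = "GD"
      · subst hG
        simp only [List.foldl_cons, get_path_code_step, get_path_code_alt_step,
          beq_iff_eq, reduceIte]
        have h0 : (0 : Int) = ((([] : List String).count "A" : Nat) : Int) := by simp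
        rw [h0]
        apply ih (segs ++ [cur]) [] _
        simp [pvOut, hout, pvFmtC, PySem.Int.toList_toStr]
      · simp only [List.foldl_cons, get_path_code_step, get_path_code_alt_step,
          beq_iff_eq, hA, hG, reduceIte]
        have hcnt : ((cur.count "A" : Nat) : Int) = (((cur ++ [c]).count "A" : Nat) : Int) := by
          simp [List.count_append, hA]
        rw [hcnt]
        exact ih segs (cur ++ [c]) out hout

-- ===== VERDICT (by name: the statement is the Claim_ definition above) =====
theorem get_path_code_spec : Claim_equal_get_path_code := by
  intro code_list _
  unfold Spec_get_path_code get_path_code get_path_code_alt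
  apply String.toList_inj.mp
  have h := pvLoopInv code_list [] [] "" (by simp [pvOut])
  simp only [List.count_nil, Nat.cast_zero] at h
  rw [h]
  have : ∀ segs : List (List String),
      (PySem.Str.join "G" (segs.map (fun seg => PySem.Int.toStr ((PySem.List.count seg "A" : Nat) : Int)))).toList
      = PySem.Chars.join ['G'] (segs.map pvFmtC) := by
    intro segs
    rw [PySem.Str.toList_join]
    simp only [List.map_map, Function.comp_def, PySem.Int.toList_toStr, PySem.List.count_eq]
    rfl
  rw [this]
  rw [show ((code_list.foldl get_path_code_alt_step ([], [])).1 ++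
      [(code_list.foldl get_path_code_alt_step ([], [])).2]).map pvFmtC
    = (code_list.foldl get_path_code_alt_step ([], [])).1.map pvFmtC ++
      [pvFmtC (code_list.foldl get_path_code_alt_step ([], [])).2] by simp]
  rw [← pvJoinG]
  simp [pvOut, List.map_map, Function.comp_def]
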